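-- pv_equiv track=rewrite | github.com/ddnimara/Google-Coding-Challenges | Markov Terminal Point/markovTerminalPoints.py | bfs
-- ===== SOURCE A (Python) =====
-- def bfs(matrix,root):
--     """ Traditional BFS implementation"""
--     visited = [0 for i in range(len(matrix))] # visited[i] = 0 iff there is no path from root->i
--     queue = [root]
--     #visited[root]=1
--     while len(queue)>0:
--         parent = queue.pop(0)
--         for i in range(len(matrix)):
--             if matrix[parent][i]!=0 and visited[i]==0:
--                 queue.append(i)
--                 visited[i]=1
--
--     return visited
-- ===== SOURCE B (Python) =====
-- def bfs(matrix, root):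
--     """Reachability from root by level-synchronous frontier expansion over sets."""
--     n = len(matrix)
--     reached = set()
--     frontier = [root]
--     while frontier:
--         nxt = {v for u in frontier for v in range(n) if matrix[u][v] != 0} - reached
--         reached |= nxt
--         frontier = sorted(nxt)
--     return [1 if v in reached else 0 for v in range(n)]
-- ===== Notes on version B (the rewrite author's own statement) =====
-- stated objective: alternative
-- what changed: Replaces the FIFO-queue BFS (pop one node, mark and enqueue its unvisited successors one by one) by level-synchronous frontier expansion: each round a set comprehension collects all successors of the whole frontier, set-subtracts the already-reached nodes, and the result becomes both the new marks and the next frontier; the answer is an indicator list over the reached set.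
-- outside the precondition, e.g. on bfs([[0, 0], [0]], 0): A returns [0, 0], B returns [0, 0]
import Mathlib
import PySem

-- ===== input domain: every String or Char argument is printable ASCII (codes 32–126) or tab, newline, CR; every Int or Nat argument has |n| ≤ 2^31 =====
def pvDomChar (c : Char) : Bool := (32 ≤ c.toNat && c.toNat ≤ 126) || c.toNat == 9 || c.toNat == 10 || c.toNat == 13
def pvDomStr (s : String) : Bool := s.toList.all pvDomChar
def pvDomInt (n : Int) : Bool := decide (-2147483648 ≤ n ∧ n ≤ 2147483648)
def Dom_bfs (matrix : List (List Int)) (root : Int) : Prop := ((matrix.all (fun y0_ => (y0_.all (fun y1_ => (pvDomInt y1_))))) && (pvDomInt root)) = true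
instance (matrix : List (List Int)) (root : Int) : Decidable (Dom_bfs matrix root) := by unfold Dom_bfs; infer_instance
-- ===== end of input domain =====

-- B replaces A's FIFO-queue BFS by level-synchronous frontier expansion (per-round set
-- comprehension minus the reached set); same return value (objective: alternative).

-- ===== PORT A =====
-- one iteration of A's inner 'for i in range(len(matrix))' loop; state = (visited, queue-after-pop)
def bfsStep (row : List Int) (st : List Int × List Int) (i : Nat) : List Int × List Int :=
  if row.getD i 0 ≠ 0 ∧ st.1.getD i 0 = 0 then (st.1.set i 1, st.2 ++ [(i : Int)]) else st

-- helper lemma cited by bfsLoop's recursive-call proof and decreasing_by (termination of A's while loop)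
theorem bfsStep_fold_meas (row : List Int) (L : List Nat) :
    ∀ (v q : List Int), (∀ i ∈ L, i < v.length) →
      (L.foldl (bfsStep row) (v, q)).1.length = v.length ∧
      (L.foldl (bfsStep row) (v, q)).1.count 0 + (L.foldl (bfsStep row) (v, q)).2.length
        = v.count 0 + q.length ∧
      (L.foldl (bfsStep row) (v, q)).1.count 0 ≤ v.count 0 := by
  have hcount : ∀ (v : List Int) (i : Nat), i < v.length → v.getD i 0 = 0 →
      (v.set i 1).count 0 + 1 = v.count 0 := by
    intro v i hi h0
    induction v generalizing i with
    | nil => simp at hi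
    | cons a t ih =>
      cases i with
      | zero => simp_all
      | succ n =>
        simp only [List.set_cons_succ, List.count_cons]
        have := ih n (by simpa using hi) (by simpa using h0)
        omega
  induction L with
  | nil => intro v q _; simp
  | cons i L ih =>
    intro v q hL
    simp only [List.foldl_cons]
    by_cases hg : row.getD i 0 ≠ 0 ∧ v.getD i 0 = 0
    · have hi : i < v.length := hL i (by simp)
      have hstep : bfsStep row (v, q) i = (v.set i 1, q ++ [(i : Int)]) := by
        simp only [bfsStep]; rw [if_pos hg]
      rw [hstep]
      have hlen : (v.set i 1).length = v.length := by simp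
      have := ih (v.set i 1) (q ++ [(i : Int)]) (by intro j hj; rw [hlen]; exact hL j (by simp [hj]))
      have hc := hcount v i hi hg.2
      simp only [List.length_append, List.length_cons, List.length_nil] at this ⊢
      omega
    · have hstep : bfsStep row (v, q) i = (v, q) := by simp only [bfsStep]; rw [if_neg hg]
      rw [hstep]
      exact ih v q (by intro j hj; exact hL j (by simp [hj]))

-- A's while loop; 'h' only records that visited has matrix's length (true throughout the run),
-- which the termination measure needs
def bfsLoop (matrix : List (List Int)) (visited : List Int) (queue : List Int)
    (h : visited.length = matrix.length) : List Int :=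
  match queue with
  | [] => visited
  | parent :: rest =>
    bfsLoop matrix
      ((List.range matrix.length).foldl (bfsStep (PySem.List.pyGetD matrix parent [])) (visited, rest)).1
      ((List.range matrix.length).foldl (bfsStep (PySem.List.pyGetD matrix parent [])) (visited, rest)).2
      (((bfsStep_fold_meas _ _ visited rest (by intro i hi; rw [h]; exact List.mem_range.mp hi)).1).trans h)
termination_by 2 * visited.count 0 + queue.length
decreasing_by
  have hm := bfsStep_fold_meas (PySem.List.pyGetD matrix parent [])
      (List.range matrix.length) visited rest
      (by intro i hi; rw [h]; exact List.mem_range.mp hi)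
  simp only [List.length_cons]
  omega

-- matrix[parent] is read with PySem.List.pyGetD (exact under Pre_: every popped parent is in range)
def bfs (matrix : List (List Int)) (root : Int) : List Int :=
  bfsLoop matrix (List.replicate matrix.length 0) [root] (by simp)

-- ===== PORT B =====
-- the round's set comprehension {v for u in frontier for v in range(n) if matrix[u][v] != 0}
-- (matrix[u] via PySem.List.pyGetD; row[v] via getD 0, exact under Pre_: scanned rows are full length)
def bCands (matrix : List (List Int)) (frontier : List Int) : List Int :=
  frontier.flatMap (fun u =>
    ((List.range matrix.length).filter
      (fun v => decide ((PySem.List.pyGetD matrix u []).getD v 0 ≠ 0))).map Int.ofNat)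

-- nxt = {...comprehension...} - reached
def bNxt (matrix : List (List Int)) (reached frontier : List Int) : List Int :=
  PySem.Set.diff (PySem.Set.ofList (bCands matrix frontier)) reached

-- facts bfsAltLoop's recursion needs: nxt is duplicate-free, fresh, index-bounded, and '|=' appends
theorem bNxt_spec (matrix : List (List Int)) (reached frontier : List Int) :
    (bNxt matrix reached frontier).Nodup ∧
    (∀ x ∈ bNxt matrix reached frontier, x ∉ reached ∧
      ∃ j : Nat, j < matrix.length ∧ x = (j : Int)) ∧
    PySem.Set.union reached (bNxt matrix reached frontier)
      = reached ++ bNxt matrix reached frontier := by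
  have hnd : (bNxt matrix reached frontier).Nodup :=
    PySem.Set.nodup_diff _ reached (PySem.Set.nodup_ofList (bCands matrix frontier))
  have hmem : ∀ x ∈ bNxt matrix reached frontier, x ∉ reached ∧
      ∃ j : Nat, j < matrix.length ∧ x = (j : Int) := by
    intro x hx
    have hx' := (PySem.Set.mem_diff _ _ _).mp hx
    refine ⟨hx'.2, ?_⟩
    have hc := (PySem.Set.mem_ofList _ _).mp hx'.1
    obtain ⟨u, hu, hcu⟩ := List.mem_flatMap.mp hc
    obtain ⟨v, hvf, rfl⟩ := List.mem_map.mp hcu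
    exact ⟨v, List.mem_range.mp (List.mem_filter.mp hvf).1, rfl⟩
  exact ⟨hnd, hmem, PySem.Set.update_eq_append_of_disjoint reached _ hnd
    (fun x hx => (hmem x hx).1)⟩

-- a duplicate-free list of casts of naturals below n has at most n elements (termination bound)
theorem nodup_length_le (n : Nat) (l : List Int) (h : l.Nodup)
    (hb : ∀ x ∈ l, ∃ j : Nat, j < n ∧ x = (j : Int)) : l.length ≤ n := by
  have hsub : l ⊆ (List.range n).map Int.ofNat := by
    intro x hx
    obtain ⟨j, hj, rfl⟩ := hb x hx
    exact List.mem_map.mpr ⟨j, List.mem_range.mpr hj, rfl⟩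
  have h1 : l.toFinset.card = l.length := List.toFinset_card_of_nodup h
  have h2 : l.toFinset ⊆ ((List.range n).map Int.ofNat).toFinset := by
    intro x hx
    exact List.mem_toFinset.mpr (hsub (List.mem_toFinset.mp hx))
  have h3 := Finset.card_le_card h2
  have h4 := ((List.range n).map Int.ofNat).toFinset_card_le
  simp only [List.length_map, List.length_range] at h4
  omega

-- B's while loop; 'h' records that reached is duplicate-free with indices below n (termination)
def bfsAltLoop (matrix : List (List Int)) (reached frontier : List Int)
    (h : reached.Nodup ∧ ∀ x ∈ reached, ∃ j : Nat, j < matrix.length ∧ x = (j : Int)) :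
    List Int :=
  match frontier with
  | [] => reached
  | u :: rest =>
    bfsAltLoop matrix
      (PySem.Set.union reached (bNxt matrix reached (u :: rest)))
      (PySem.List.sorted (bNxt matrix reached (u :: rest)) (fun x => x) false)
      (by
        obtain ⟨hn, hmem, hun⟩ := bNxt_spec matrix reached (u :: rest)
        rw [hun]
        refine ⟨List.Nodup.append h.1 hn (fun x hx hx' => (hmem x hx').1 hx), ?_⟩
        intro x hx
        rcases List.mem_append.mp hx with hx | hx
        · exact h.2 x hx
        · exact (hmem x hx).2)
termination_by 2 * (matrix.length + 1 - reached.length) + frontier.length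
decreasing_by
  obtain ⟨hn, hmem, hun⟩ := bNxt_spec matrix reached (u :: rest)
  have hlen : (PySem.Set.union reached (bNxt matrix reached (u :: rest))).length
      = reached.length + (bNxt matrix reached (u :: rest)).length := by
    rw [hun]; exact List.length_append
  have hbound : (PySem.Set.union reached (bNxt matrix reached (u :: rest))).length
      ≤ matrix.length := by
    apply nodup_length_le
    · rw [hun]
      exact List.Nodup.append h.1 hn (fun x hx hx' => (hmem x hx').1 hx)
    · intro x hx
      rw [hun] at hx
      rcases List.mem_append.mp hx with hx | hx
      · exact h.2 x hx
      · exact (hmem x hx).2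
  have hsl : (PySem.List.sorted (bNxt matrix reached (u :: rest)) (fun x => x) false).length
      = (bNxt matrix reached (u :: rest)).length := PySem.List.length_sorted _ _ _
  simp only [List.length_cons]
  omega

-- B: per-round frontier expansion, then the indicator list over range(n)
def bfs_alt (matrix : List (List Int)) (root : Int) : List Int :=
  (List.range matrix.length).map
    (fun v : Nat => if (v : Int) ∈ bfsAltLoop matrix [] [root] ⟨List.nodup_nil, by simp⟩ then 1 else 0)

-- ===== PRECONDITION & SPEC =====
-- Pre_ excludes ragged matrices (some row shorter than the height): on those A raises IndexError
-- as soon as a short row is scanned, and when no short row is ever scanned A and B return the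
-- same ordinary value, but 'which rows get scanned' is a reachability question, not a closed-form
-- shape condition, so the whole ragged class is excluded.  It also excludes roots outside
-- [-n, n) on a nonempty matrix, where A raises IndexError.  Negative in-range roots (Python
-- wraparound) stay inside Pre_.
def Pre_bfs (matrix : List (List Int)) (root : Int) : Prop :=
  (∀ row ∈ matrix, matrix.length ≤ row.length) ∧
  (matrix.length = 0 ∨ (-(matrix.length : Int) ≤ root ∧ root < (matrix.length : Int)))
instance (matrix : List (List Int)) (root : Int) : Decidable (Pre_bfs matrix root) := by
  unfold Pre_bfs; infer_instance

def pvWitness_bfs : List (List Int) × Int := ([[0, 1], [1, 0]], 0)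

def Spec_bfs (matrix : List (List Int)) (root : Int) (out : List Int) : Prop := out = bfs_alt matrix root
instance (matrix : List (List Int)) (root : Int) (out : List Int) : Decidable (Spec_bfs matrix root out) := by unfold Spec_bfs; infer_instance

-- ===== CLAIM (what is proved, stated in full; the proofs are below) =====
def Claim_equal_bfs : Prop := ∀ (matrix : List (List Int)) (root : Int), Dom_bfs matrix root → Pre_bfs matrix root → Spec_bfs matrix root (bfs matrix root)

-- ===== LEMMAS AND PROOFS =====

-- the edge relation of the graph A and B both explore (targets below the matrix height)
def edgeG (m : List (List Int)) (u v : Nat) : Prop :=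
  v < m.length ∧ (m.getD u []).getD v 0 ≠ 0

-- ---- generic list-access lemmas ----
theorem getD_set_char {α : Type} (v : List α) (i j : Nat) (x d : α) :
    (v.set i x).getD j d = if i = j ∧ j < v.length then x else v.getD j d := by
  simp only [List.getD_eq_getElem?_getD, List.getElem?_set]
  split_ifs with h1 h2 h3 <;> simp_all

theorem fold_char (row v q : List Int) : ∀ (mm : Nat), mm ≤ v.length →
    ((List.range mm).foldl (bfsStep row) (v, q)).1.length = v.length ∧
    (∀ i : Nat, ((List.range mm).foldl (bfsStep row) (v, q)).1.getD i 0
      = if i < mm ∧ row.getD i 0 ≠ 0 ∧ v.getD i 0 = 0 then 1 else v.getD i 0) ∧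
    ((List.range mm).foldl (bfsStep row) (v, q)).2
      = q ++ ((List.range mm).filter (fun i => decide (row.getD i 0 ≠ 0 ∧ v.getD i 0 = 0))).map Int.ofNat := by
  intro mm
  induction mm with
  | zero => simp
  | succ t ih =>
    intro hmm
    have ht := ih (by omega)
    obtain ⟨h1, h2, h3⟩ := ht
    rw [List.range_succ, List.foldl_append, List.filter_append]
    set st := (List.range t).foldl (bfsStep row) (v, q) with hst
    have hguard : st.1.getD t 0 = v.getD t 0 := by rw [h2]; simp
    simp only [List.foldl_cons, List.foldl_nil]
    by_cases hg : row.getD t 0 ≠ 0 ∧ v.getD t 0 = 0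
    · have hstep : bfsStep row st t = (st.1.set t 1, st.2 ++ [(t : Int)]) := by
        simp only [bfsStep]; rw [if_pos (by rw [hguard]; exact hg)]
      rw [hstep]
      refine ⟨by simpa using h1, ?_, ?_⟩
      · intro i
        rw [getD_set_char, h1, h2]
        by_cases hit : t = i
        · subst hit
          rw [if_pos ⟨rfl, by omega⟩, if_pos ⟨by omega, hg.1, hg.2⟩]
        · rw [if_neg (fun hc => hit hc.1)]
          exact (if_congr ⟨fun h => ⟨by omega, h.2⟩, fun h => ⟨by omega, h.2⟩⟩ rfl rfl).symm
      · have hg' : (fun i => decide (row.getD i 0 ≠ 0 ∧ v.getD i 0 = 0)) t = true := by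
          simpa using hg
        rw [h3, List.filter_cons, if_pos hg']
        simp
    · have hstep : bfsStep row st t = st := by
        simp only [bfsStep]; rw [if_neg (by rw [hguard]; exact hg)]
      rw [hstep]
      refine ⟨h1, ?_, ?_⟩
      · intro i
        rw [h2]
        by_cases hit : t = i
        · subst hit
          rw [if_neg (fun hc => hg hc.2), if_neg (fun hc => hg hc.2)]
        · exact (if_congr ⟨fun h => ⟨by omega, h.2⟩, fun h => ⟨by omega, h.2⟩⟩ rfl rfl).symm
      · simp only [List.getD_eq_getElem?_getD] at hg
        rw [h3, List.filter_cons]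
        simp [hg]

-- ---- A-side: the BFS loop invariant ----
def InvA (m : List (List Int)) (rn : Nat) (v q : List Int) : Prop :=
  v.length = m.length ∧
  (∀ i : Nat, v.getD i 0 = 0 ∨ v.getD i 0 = 1) ∧
  (∀ i : Nat, v.getD i 0 = 1 → Relation.TransGen (edgeG m) rn i) ∧
  (∀ x ∈ q, ∃ jj : Nat, jj < m.length ∧ x = (jj : Int) ∧ (jj = rn ∨ v.getD jj 0 = 1)) ∧
  (∀ u : Nat, (u = rn ∨ v.getD u 0 = 1) → ((u : Int) ∉ q) → ∀ i, edgeG m u i → v.getD i 0 = 1)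

theorem loopA (m : List (List Int)) (rn : Nat) :
    ∀ (v q : List Int) (h : v.length = m.length), InvA m rn v q →
    (bfsLoop m v q h).length = m.length ∧
    ∀ i : Nat, ((bfsLoop m v q h).getD i 0 = 1 ↔ Relation.TransGen (edgeG m) rn i) ∧
      ((bfsLoop m v q h).getD i 0 = 0 ∨ (bfsLoop m v q h).getD i 0 = 1) := by
  have base : ∀ (v : List Int) (h : v.length = m.length), InvA m rn v [] →
      (bfsLoop m v [] h).length = m.length ∧
      ∀ i : Nat, ((bfsLoop m v [] h).getD i 0 = 1 ↔ Relation.TransGen (edgeG m) rn i) ∧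
        ((bfsLoop m v [] h).getD i 0 = 0 ∨ (bfsLoop m v [] h).getD i 0 = 1) := by
    intro v h hInv
    obtain ⟨hlen, h01, hTG, hq, hcl⟩ := hInv
    rw [bfsLoop]
    refine ⟨hlen, fun i => ⟨⟨fun h1 => hTG i h1, fun htg => ?_⟩, h01 i⟩⟩
    induction htg with
    | single he => exact hcl rn (Or.inl rfl) (by simp) _ he
    | tail hab he ih => exact hcl _ (Or.inr ih) (by simp) _ he
  have main : ∀ (N : Nat) (v q : List Int) (h : v.length = m.length),
      2 * v.count 0 + q.length ≤ N → InvA m rn v q →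
      (bfsLoop m v q h).length = m.length ∧
      ∀ i : Nat, ((bfsLoop m v q h).getD i 0 = 1 ↔ Relation.TransGen (edgeG m) rn i) ∧
        ((bfsLoop m v q h).getD i 0 = 0 ∨ (bfsLoop m v q h).getD i 0 = 1) := by
    intro N
    induction N with
    | zero =>
      intro v q h hN hInv
      cases q with
      | nil => exact base v h hInv
      | cons p rest => simp at hN
    | succ N ihN =>
      intro v q h hN hInv
      cases q with
      | nil => exact base v h hInv
      | cons p rest =>
        obtain ⟨hlen, h01, hTG, hq, hcl⟩ := hInv
        obtain ⟨jj, hjjn, rfl, hjs⟩ := hq p (by simp)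
        rw [bfsLoop]
        have hrow : PySem.List.pyGetD m ((jj : Int)) [] = m.getD jj [] := by
          simp [PySem.List.pyGetD_natCast]
        obtain ⟨h1, h2, h3⟩ :=
          fold_char (PySem.List.pyGetD m ((jj : Int)) []) v rest m.length (le_of_eq hlen.symm)
        set row := PySem.List.pyGetD m ((jj : Int)) [] with hrowdef
        set st := (List.range m.length).foldl (bfsStep row) (v, rest) with hstdef
        have hcond : ∀ i : Nat, (i < m.length ∧ row.getD i 0 ≠ 0 ∧ v.getD i 0 = 0)
            ↔ (edgeG m jj i ∧ v.getD i 0 = 0) := by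
          intro i
          rw [hrow]
          unfold edgeG
          tauto
        have hmono : ∀ i : Nat, v.getD i 0 = 1 → st.1.getD i 0 = 1 := by
          intro i hi
          rw [h2]
          split_ifs with hc
          · rfl
          · exact hi
        have hmem : ∀ x : Int, x ∈ st.2 ↔ x ∈ rest ∨
            ∃ i : Nat, i < m.length ∧ (row.getD i 0 ≠ 0 ∧ v.getD i 0 = 0) ∧ x = (i : Int) := by
          intro x
          rw [h3]
          constructor
          · intro hx
            rcases List.mem_append.mp hx with hx | hx
            · exact Or.inl hx
            · obtain ⟨i, hif, rfl⟩ := List.mem_map.mp hx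
              obtain ⟨hir, hPd⟩ := List.mem_filter.mp hif
              exact Or.inr ⟨i, List.mem_range.mp hir, of_decide_eq_true hPd, rfl⟩
          · intro hx
            rcases hx with hx | ⟨i, hin, hPi, rfl⟩
            · exact List.mem_append.mpr (Or.inl hx)
            · exact List.mem_append.mpr (Or.inr (List.mem_map.mpr
                ⟨i, List.mem_filter.mpr ⟨List.mem_range.mpr hin, decide_eq_true hPi⟩, rfl⟩))
        have hmeas := bfsStep_fold_meas row (List.range m.length) v rest
          (by intro i hi; rw [hlen]; exact List.mem_range.mp hi)
        have hInv' : InvA m rn st.1 st.2 := by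
          refine ⟨h1.trans hlen, ?_, ?_, ?_, ?_⟩
          · intro i
            rw [h2]
            split_ifs with hc
            · exact Or.inr rfl
            · exact h01 i
          · intro i hi
            rw [h2] at hi
            by_cases hc : i < m.length ∧ row.getD i 0 ≠ 0 ∧ v.getD i 0 = 0
            · obtain ⟨he, _⟩ := (hcond i).mp hc
              rcases hjs with rfl | hj1
              · exact Relation.TransGen.single he
              · exact (hTG jj hj1).tail he
            · rw [if_neg hc] at hi
              exact hTG i hi
          · intro x hx
            rcases (hmem x).mp hx with hx | ⟨i, hin, hPi, rfl⟩
            · obtain ⟨jj', h1', h2', h3'⟩ := hq x (by simp [hx])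
              exact ⟨jj', h1', h2', h3'.imp id (hmono jj')⟩
            · refine ⟨i, hin, rfl, Or.inr ?_⟩
              rw [h2, if_pos ⟨hin, hPi⟩]
          · intro u hu hnotin i he
            by_cases hvu : v.getD u 0 = 1 ∨ u = rn
            · by_cases hin : ((u : Int)) ∈ ((jj : Int) :: rest : List Int)
              · rcases List.mem_cons.mp hin with heq | hinrest
                · have huj : u = jj := by exact_mod_cast heq
                  subst huj
                  rw [h2]
                  by_cases hvi : v.getD i 0 = 0
                  · rw [if_pos ((hcond i).mpr ⟨he, hvi⟩)]
                  · rw [if_neg (fun hc => hvi hc.2.2)]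
                    rcases h01 i with h0 | h0
                    · exact absurd h0 hvi
                    · exact h0
                · exact absurd ((hmem ((u : Int))).mpr (Or.inl hinrest)) hnotin
              · have hold := hcl u (hvu.symm.imp id id) hin i he
                exact hmono i hold
            · push_neg at hvu
              have hu1 : st.1.getD u 0 = 1 := by
                rcases hu with rfl | hu1
                · exact absurd rfl hvu.2
                · exact hu1
              rw [h2] at hu1
              by_cases hc : u < m.length ∧ row.getD u 0 ≠ 0 ∧ v.getD u 0 = 0
              · exact absurd ((hmem ((u : Int))).mpr
                  (Or.inr ⟨u, hc.1, hc.2, rfl⟩)) hnotin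
              · rw [if_neg hc] at hu1
                exact absurd hu1 hvu.1
        have h21 : List.count 0 st.1 + st.2.length = List.count 0 v + rest.length := hmeas.2.1
        have h22 : List.count 0 st.1 ≤ List.count 0 v := hmeas.2.2
        exact ihN st.1 st.2 (h1.trans hlen)
          (by simp only [List.length_cons] at hN; omega) hInv'
  intro v q h hInv
  exact main (2 * v.count 0 + q.length) v q h le_rfl hInv

-- normalised (Python-wrapped) root index
def normRoot (root : Int) (n : Nat) : Nat := (if root < 0 then root + n else root).toNat

theorem mapRange_getD {α : Type} (f : Nat → α) (n i : Nat) (d : α) (h : i < n) :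
    (((List.range n).map f).getD i d) = f i := by
  simp [List.getD_eq_getElem?_getD, List.getElem?_map, List.getElem?_range h]

theorem pyGetD_norm {α : Type} (xs : List α) (root : Int) (d : α) (n : Nat)
    (hlen : xs.length = n) (h1 : -(n : Int) ≤ root) (h2 : root < (n : Int)) :
    PySem.List.pyGetD xs root d = xs.getD (normRoot root n) d := by
  subst hlen
  by_cases hneg : root < 0
  · have hk : root = -(((-root).toNat : Nat) : Int) := by omega
    have h0k : 0 < (-root).toNat := by omega
    have hkl : (-root).toNat ≤ xs.length := by omega
    have hnr : normRoot root xs.length = xs.length - (-root).toNat := by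
      unfold normRoot; split_ifs <;> omega
    rw [hnr, hk, PySem.List.pyGetD_neg_natCast _ _ _ h0k hkl,
      List.getD_eq_getElem _ _ (by omega)]
    congr 1 <;> omega
  · have hnr : normRoot root xs.length = root.toNat := by unfold normRoot; split_ifs <;> omega
    rw [hnr, show root = ((root.toNat : Nat) : Int) from by omega, PySem.List.pyGetD_natCast]
    congr 1

theorem bfs_main (m : List (List Int)) (root : Int)
    (hr : -(m.length : Int) ≤ root) (hr2 : root < (m.length : Int)) :
    (bfs m root).length = m.length ∧ ∀ i < m.length,
      ((bfs m root).getD i 0 = 1 ↔ Relation.TransGen (edgeG m) (normRoot root m.length) i) ∧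
      ((bfs m root).getD i 0 = 0 ∨ (bfs m root).getD i 0 = 1) := by
  have hn0 : 0 < m.length := by omega
  have hrn : normRoot root m.length < m.length := by unfold normRoot; split_ifs <;> omega
  have hrootrow : PySem.List.pyGetD m root [] = m.getD (normRoot root m.length) [] :=
    pyGetD_norm m root [] m.length rfl hr hr2
  set rn := normRoot root m.length with hrndef
  rw [bfs, bfsLoop]
  obtain ⟨h1, h2, h3⟩ := fold_char (PySem.List.pyGetD m root []) (List.replicate m.length 0) []
    m.length (by simp)
  set st := (List.range m.length).foldl (bfsStep (PySem.List.pyGetD m root []))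
    (List.replicate m.length 0, []) with hstdef
  have hv0 : ∀ i : Nat, (List.replicate m.length (0 : Int)).getD i 0 = 0 := by
    intro i
    simp only [List.getD_eq_getElem?_getD, List.getElem?_replicate]
    split_ifs <;> rfl
  have hchar1 : ∀ i : Nat, (st.1.getD i 0 = 1 ↔ (i < m.length ∧ edgeG m rn i)) := by
    intro i
    rw [h2, hv0 i]
    constructor
    · intro h1i
      by_cases hc : i < m.length ∧ (PySem.List.pyGetD m root []).getD i 0 ≠ 0 ∧ (0 : Int) = 0
      · exact ⟨hc.1, hc.1, by rw [← hrootrow]; exact hc.2.1⟩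
      · rw [if_neg hc] at h1i
        exact absurd h1i (by norm_num)
    · rintro ⟨hi, he⟩
      rw [if_pos ⟨hi, by rw [hrootrow]; exact he.2, rfl⟩]
  have hchar0 : ∀ i : Nat, st.1.getD i 0 = 0 ∨ st.1.getD i 0 = 1 := by
    intro i
    rw [h2, hv0 i]
    split_ifs
    · exact Or.inr rfl
    · exact Or.inl rfl
  have hmem : ∀ x : Int, x ∈ st.2 ↔
      ∃ i : Nat, (i < m.length ∧ edgeG m rn i) ∧ x = (i : Int) := by
    intro x
    rw [h3]
    simp only [List.nil_append]
    constructor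
    · intro hx
      obtain ⟨i, hif, rfl⟩ := List.mem_map.mp hx
      obtain ⟨hir, hPd⟩ := List.mem_filter.mp hif
      have hP := of_decide_eq_true hPd
      exact ⟨i, ⟨List.mem_range.mp hir, List.mem_range.mp hir, by rw [← hrootrow]; exact hP.1⟩, rfl⟩
    · rintro ⟨i, ⟨hin, he⟩, rfl⟩
      exact List.mem_map.mpr ⟨i, List.mem_filter.mpr ⟨List.mem_range.mpr hin,
        decide_eq_true ⟨by rw [hrootrow]; exact he.2, hv0 i⟩⟩, rfl⟩
  have hInv : InvA m rn st.1 st.2 := by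
    refine ⟨h1.trans (by simp), hchar0, ?_, ?_, ?_⟩
    · intro i hi
      obtain ⟨_, he⟩ := (hchar1 i).mp hi
      exact Relation.TransGen.single he
    · intro x hx
      obtain ⟨i, hi, rfl⟩ := (hmem x).mp hx
      exact ⟨i, hi.1, rfl, Or.inr ((hchar1 i).mpr hi)⟩
    · intro u hu hnotin i he
      rcases hu with rfl | hu1
      · exact (hchar1 i).mpr ⟨he.1, he⟩
      · have hc := (hchar1 u).mp hu1
        exact absurd ((hmem ((u : Int))).mpr ⟨u, hc, rfl⟩) hnotin
  have hres := loopA m rn st.1 st.2 (h1.trans (by simp)) hInv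
  exact ⟨hres.1, fun i _ => ⟨(hres.2 i).1, (hres.2 i).2⟩⟩

-- ---- B-side: membership characterisation of a round ----
theorem mem_bCands (m : List (List Int)) (f : List Int) (x : Int) :
    x ∈ bCands m f ↔ ∃ u ∈ f, ∃ v : Nat, v < m.length ∧ x = (v : Int) ∧
      (PySem.List.pyGetD m u []).getD v 0 ≠ 0 := by
  constructor
  · intro hx
    obtain ⟨u, hu, hcu⟩ := List.mem_flatMap.mp hx
    obtain ⟨v, hvf, rfl⟩ := List.mem_map.mp hcu
    obtain ⟨hvr, hPd⟩ := List.mem_filter.mp hvf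
    exact ⟨u, hu, v, List.mem_range.mp hvr, rfl, of_decide_eq_true hPd⟩
  · rintro ⟨u, hu, v, hv, rfl, hne⟩
    exact List.mem_flatMap.mpr ⟨u, hu, List.mem_map.mpr
      ⟨v, List.mem_filter.mpr ⟨List.mem_range.mpr hv, decide_eq_true hne⟩, rfl⟩⟩

theorem mem_bNxt (m : List (List Int)) (reached f : List Int) (x : Int) :
    x ∈ bNxt m reached f ↔ x ∈ bCands m f ∧ x ∉ reached := by
  rw [bNxt, PySem.Set.mem_diff, PySem.Set.mem_ofList]

-- ---- B-side: the round-loop invariant ----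
def InvB (m : List (List Int)) (rn : Nat) (reached frontier : List Int) : Prop :=
  (∀ x ∈ reached, ∃ j : Nat, j < m.length ∧ x = (j : Int) ∧ Relation.TransGen (edgeG m) rn j) ∧
  (∀ x ∈ frontier, x ∈ reached) ∧
  (∀ j : Nat, (j = rn ∨ (j : Int) ∈ reached) → (j : Int) ∉ frontier →
    ∀ i : Nat, edgeG m j i → (i : Int) ∈ reached)

theorem loopB (m : List (List Int)) (rn : Nat) :
    ∀ (N : Nat) (reached frontier : List Int)
      (h : reached.Nodup ∧ ∀ x ∈ reached, ∃ j : Nat, j < m.length ∧ x = (j : Int)),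
      2 * (m.length + 1 - reached.length) + frontier.length ≤ N →
      InvB m rn reached frontier →
      ∀ i : Nat, ((i : Int) ∈ bfsAltLoop m reached frontier h ↔ Relation.TransGen (edgeG m) rn i) := by
  have base : ∀ (reached : List Int) h, InvB m rn reached [] →
      ∀ i : Nat, ((i : Int) ∈ bfsAltLoop m reached [] h ↔ Relation.TransGen (edgeG m) rn i) := by
    intro reached h hInv i
    obtain ⟨h1, _, h3⟩ := hInv
    rw [bfsAltLoop]
    constructor
    · intro hi
      obtain ⟨j, _, hj, htg⟩ := h1 _ hi
      have : i = j := by exact_mod_cast hj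
      exact this ▸ htg
    · intro htg
      induction htg with
      | single he => exact h3 rn (Or.inl rfl) (by simp) _ he
      | tail hab he ih => exact h3 _ (Or.inr ih) (by simp) _ he
  intro N
  induction N with
  | zero =>
    intro reached frontier h hN hInv
    cases frontier with
    | nil => exact base reached h hInv
    | cons u rest => simp at hN
  | succ N ihN =>
    intro reached frontier h hN hInv
    cases frontier with
    | nil => exact base reached h hInv
    | cons u rest =>
      obtain ⟨h1, h2, h3⟩ := hInv
      obtain ⟨hnd, hmm, hun⟩ := bNxt_spec m reached (u :: rest)
      set nxt := bNxt m reached (u :: rest) with hnxt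
      set R' := PySem.Set.union reached nxt with hR'
      have hmemR' : ∀ x : Int, x ∈ R' ↔ x ∈ reached ∨ x ∈ nxt := by
        intro x; rw [hun, List.mem_append]
      have hmemF' : ∀ x : Int,
          x ∈ PySem.List.sorted nxt (fun x => x) false ↔ x ∈ nxt := by
        intro x; exact PySem.List.mem_sorted _ _ _ _
      have hInv' : InvB m rn R' (PySem.List.sorted nxt (fun x => x) false) := by
        refine ⟨?_, ?_, ?_⟩
        · intro x hx
          rcases (hmemR' x).mp hx with hx | hx
          · exact h1 x hx
          · obtain ⟨hc, _⟩ := (mem_bNxt m reached (u :: rest) x).mp hx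
            obtain ⟨uu, huu, v, hv, rfl, hne⟩ := (mem_bCands m (u :: rest) x).mp hc
            obtain ⟨j, hjn, rfl, htg⟩ := h1 uu (h2 uu huu)
            rw [PySem.List.pyGetD_natCast] at hne
            exact ⟨v, hv, rfl, htg.tail ⟨hv, hne⟩⟩
        · intro x hx
          exact (hmemR' x).mpr (Or.inr ((hmemF' x).mp hx))
        · intro j hj hnf i he
          have hjn : (j : Int) ∉ nxt := fun hc => hnf ((hmemF' _).mpr hc)
          have hj' : j = rn ∨ (j : Int) ∈ reached := by
            rcases hj with rfl | hj
            · exact Or.inl rfl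
            · rcases (hmemR' _).mp hj with hj | hj
              · exact Or.inr hj
              · exact absurd hj hjn
          by_cases hjf : (j : Int) ∈ (u :: rest : List Int)
          · -- j is in the frontier: its successor i lands in the comprehension
            have hcand : (i : Int) ∈ bCands m (u :: rest) := by
              refine (mem_bCands m (u :: rest) _).mpr ⟨(j : Int), hjf, i, he.1, rfl, ?_⟩
              rw [PySem.List.pyGetD_natCast]
              exact he.2
            by_cases hir : (i : Int) ∈ reached
            · exact (hmemR' _).mpr (Or.inl hir)
            · exact (hmemR' _).mpr (Or.inr ((mem_bNxt m reached (u :: rest) _).mpr ⟨hcand, hir⟩))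
          · exact (hmemR' _).mpr (Or.inl (h3 j hj' hjf i he))
      have hlenR' : R'.length = reached.length + nxt.length := by
        rw [hun]; exact List.length_append
      have hbound : R'.length ≤ m.length := by
        apply nodup_length_le
        · rw [hun]
          exact List.Nodup.append h.1 hnd (fun x hx hx' => (hmm x hx').1 hx)
        · intro x hx
          rcases (hmemR' x).mp hx with hx | hx
          · exact h.2 x hx
          · exact (hmm x hx).2
      have hsl : (PySem.List.sorted nxt (fun x => x) false).length = nxt.length :=
        PySem.List.length_sorted _ _ _
      intro i
      rw [bfsAltLoop]
      exact ihN R' (PySem.List.sorted nxt (fun x => x) false) _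
        (by simp only [List.length_cons] at hN; omega) hInv' i

theorem bfs_alt_main (m : List (List Int)) (root : Int)
    (hr : -(m.length : Int) ≤ root) (hr2 : root < (m.length : Int)) :
    (bfs_alt m root).length = m.length ∧ ∀ i < m.length,
      ((bfs_alt m root).getD i 0 = 1 ↔ Relation.TransGen (edgeG m) (normRoot root m.length) i) ∧
      ((bfs_alt m root).getD i 0 = 0 ∨ (bfs_alt m root).getD i 0 = 1) := by
  have hn0 : 0 < m.length := by omega
  have hrootrow : PySem.List.pyGetD m root [] = m.getD (normRoot root m.length) [] :=
    pyGetD_norm m root [] m.length rfl hr hr2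
  set rn := normRoot root m.length with hrndef
  refine ⟨by simp [bfs_alt], ?_⟩
  intro i hi
  rw [bfs_alt, mapRange_getD _ _ _ _ hi]
  have hkey : ∀ k : Nat,
      ((k : Int) ∈ bfsAltLoop m [] [root] ⟨List.nodup_nil, by simp⟩
        ↔ Relation.TransGen (edgeG m) rn k) := by
    intro k
    rw [bfsAltLoop]
    obtain ⟨hnd, hmm, hun⟩ := bNxt_spec m [] [root]
    set nxt := bNxt m [] [root] with hnxt
    set R' := PySem.Set.union [] nxt with hR'
    have hmemR' : ∀ x : Int, x ∈ R' ↔ x ∈ nxt := by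
      intro x; rw [hun]; simp
    have hmemN : ∀ x : Int, x ∈ nxt ↔ ∃ v : Nat, v < m.length ∧ x = (v : Int) ∧ edgeG m rn v := by
      intro x
      rw [hnxt, mem_bNxt, mem_bCands]
      constructor
      · rintro ⟨⟨uu, huu, v, hv, rfl, hne⟩, -⟩
        rcases List.mem_singleton.mp huu with rfl
        rw [hrootrow] at hne
        exact ⟨v, hv, rfl, hv, hne⟩
      · rintro ⟨v, hv, rfl, he⟩
        refine ⟨⟨root, by simp, v, hv, rfl, ?_⟩, by simp⟩
        rw [hrootrow]
        exact he.2
    have hmemF' : ∀ x : Int,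
        x ∈ PySem.List.sorted nxt (fun x => x) false ↔ x ∈ nxt := by
      intro x; exact PySem.List.mem_sorted _ _ _ _
    have hInv' : InvB m rn R' (PySem.List.sorted nxt (fun x => x) false) := by
      refine ⟨?_, ?_, ?_⟩
      · intro x hx
        obtain ⟨v, hv, rfl, he⟩ := (hmemN x).mp ((hmemR' x).mp hx)
        exact ⟨v, hv, rfl, Relation.TransGen.single he⟩
      · intro x hx
        exact (hmemR' x).mpr ((hmemF' x).mp hx)
      · intro j hj hnf i he
        have hjn : (j : Int) ∉ nxt := fun hc => hnf ((hmemF' _).mpr hc)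
        have hjrn : j = rn := by
          rcases hj with rfl | hj
          · rfl
          · exact absurd ((hmemR' _).mp hj) hjn
        subst hjrn
        exact (hmemR' _).mpr ((hmemN _).mpr ⟨i, he.1, rfl, he⟩)
    exact loopB m rn (2 * (m.length + 1 - R'.length)
        + (PySem.List.sorted nxt (fun x => x) false).length) R'
      (PySem.List.sorted nxt (fun x => x) false) _ le_rfl hInv' k
  refine ⟨⟨?_, ?_⟩, ?_⟩
  · intro h1
    apply (hkey i).mp
    by_contra hc
    rw [if_neg hc] at h1
    norm_num at h1
  · intro htg
    rw [if_pos ((hkey i).mpr htg)]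
  · split_ifs
    · exact Or.inr rfl
    · exact Or.inl rfl

-- ===== VERDICT (by name: the statement is the Claim_ definition above) =====
theorem bfs_spec : Claim_equal_bfs := by
  intro m root _ hPre
  unfold Spec_bfs
  rcases hPre with ⟨hrow, hn⟩
  rcases hn with hn | ⟨hr, hr2⟩
  · -- empty matrix: both sides are []
    have hm : m = [] := List.length_eq_zero_iff.mp hn
    subst hm
    simp [bfs, bfs_alt, bfsLoop]
  · have hA := bfs_main m root hr hr2
    have hB := bfs_alt_main m root hr hr2
    apply List.ext_getElem (by omega)
    intro i hi hi'
    have hiA : i < m.length := by omega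
    have h1 := (hA.2 i hiA); have h2 := hB.2 i hiA
    have e1 : (bfs m root)[i] = (bfs m root).getD i 0 := by
      rw [List.getD_eq_getElem?_getD, List.getElem?_eq_getElem hi]; rfl
    have e2 : (bfs_alt m root)[i] = (bfs_alt m root).getD i 0 := by
      rw [List.getD_eq_getElem?_getD, List.getElem?_eq_getElem hi']; rfl
    rw [e1, e2]
    by_cases hT : Relation.TransGen (edgeG m) (normRoot root m.length) i
    · rw [h1.1.mpr hT, h2.1.mpr hT]
    · rcases h1.2 with h | h
      · rcases h2.2 with h' | h'
        · rw [h, h']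
        · exact absurd (h2.1.mp h') hT
      · exact absurd (h1.1.mp h) hT
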